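-- pv_equiv track=rewrite | github.com/repeater1384/Algorythm-Solving-Log | 프로그래머스/lv0/120956. 옹알이 （1）/옹알이 （1）.py | solution
-- ===== SOURCE A (Python) =====
-- def solution(babbling):
--     answer = 0
--     can = ['aya','ye','woo','ma']
--     for babb in babbling:
--         used = []
--         for _ in range(4):
--             for c in can:
--                 if babb[:len(c)] == c and c not in used:
--                     used.append(c)
--                     babb = babb[len(c):]
--         if not babb:
--             answer += 1
--     return answer
-- ===== SOURCE B (Python) =====
-- def picks(avail):
--     # all ways to pick one element: (picked, remaining), structurally recursive
--     if not avail: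
--         return []
--     x, rest = avail[0], avail[1:]
--     return [(x, rest)] + [(w, [x] + r) for w, r in picks(rest)]
--
--
-- def solution(babbling):
--     words = ['aya', 'ye', 'woo', 'ma']
--     # precompute every concatenation of a permutation of a subset of words
--     layer = [('', words)]
--     valid = ['']
--     for _ in words:
--         layer = [(s + w, rest) for s, avail in layer for w, rest in picks(avail)]
--         valid += [s for s, _ in layer]
--     return sum(1 for b in babbling if b in valid)
-- ===== Notes on version B (the rewrite author's own statement) =====
-- stated objective: alternative
-- what changed: A greedily strips the four pronounceable words from each string in four passes; B precomputes once the table of all concatenations of permutations of subsets of the four words (including the empty string) and counts the babblings that are members of that table.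
import Mathlib
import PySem

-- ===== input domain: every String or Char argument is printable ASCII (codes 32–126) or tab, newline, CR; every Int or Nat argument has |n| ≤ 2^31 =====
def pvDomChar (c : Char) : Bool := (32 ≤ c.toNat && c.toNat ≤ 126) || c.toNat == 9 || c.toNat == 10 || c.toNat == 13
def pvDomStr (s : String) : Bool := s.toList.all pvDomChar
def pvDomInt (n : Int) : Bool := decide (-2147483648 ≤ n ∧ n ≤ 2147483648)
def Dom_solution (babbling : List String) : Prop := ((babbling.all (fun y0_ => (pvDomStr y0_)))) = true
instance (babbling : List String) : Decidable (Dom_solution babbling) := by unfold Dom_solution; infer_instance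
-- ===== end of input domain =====

-- B replaces A's per-string greedy four-pass stripping by a one-time table of all
-- concatenations of permutations of subsets of the four words plus membership counting
-- (objective: alternative two-phase algorithm).

-- ===== PORT A =====
-- can = ['aya','ye','woo','ma']
def canA : List (List Char) := ["aya","ye","woo","ma"].map String.toList

-- body of the inner `for c in can` loop of A
def stepA (st : List Char × List (List Char)) (c : List Char) : List Char × List (List Char) :=
  if PySem.List.slice st.1 none (some (c.length : Int)) = c ∧ c ∉ st.2
  then (PySem.List.slice st.1 (some (c.length : Int)) none, st.2 ++ [c])
  else st

-- A's per-string parse: 4 passes (`for _ in range(4)`) of the `for c in can` loop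
def parseA (b : List Char) : List Char × List (List Char) :=
  (PySem.List.pyRange 0 4 1).foldl (fun st _ => canA.foldl stepA st) (b, [])

def solution (babbling : List String) : Int :=
  babbling.foldl (fun answer babb =>
    if (parseA babb.toList).1 = [] then answer + 1 else answer) 0

-- ===== PORT B =====
-- all ways to pick one element of `avail`: (picked, remaining)
def picksB : List (List Char) → List (List Char × List (List Char))
  | [] => []
  | x :: rest => (x, rest) :: (picksB rest).map (fun wr => (wr.1, x :: wr.2))

def wordsB : List (List Char) := ["aya","ye","woo","ma"].map String.toList

-- body of the `for _ in words` loop: extend every partial permutation by one unused word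
def stepB (st : List (List Char × List (List Char)) × List (List Char)) :
    List (List Char × List (List Char)) × List (List Char) :=
  let layer := st.1.flatMap (fun sa => (picksB sa.2).map (fun wr => (sa.1 ++ wr.1, wr.2)))
  (layer, st.2 ++ layer.map Prod.fst)

-- the precomputed table: every concatenation of a permutation of a subset of wordsB
def validB : List (List Char) :=
  (wordsB.foldl (fun st _ => stepB st) ([([], wordsB)], [[]])).2

def solution_alt (babbling : List String) : Int :=
  babbling.foldl (fun acc b => if validB.contains b.toList then acc + 1 else acc) 0

-- ===== PRECONDITION & SPEC =====
def Spec_solution (babbling : List String) (out : Int) : Prop := out = solution_alt babbling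
instance (babbling : List String) (out : Int) : Decidable (Spec_solution babbling out) := by unfold Spec_solution; infer_instance

-- ===== CLAIM (what is proved, stated in full; the proofs are below) =====
def Claim_equal_solution : Prop := ∀ (babbling : List String), Dom_solution babbling → Spec_solution babbling (solution babbling)

-- ===== LEMMAS AND PROOFS =====

-- invariant of one pass of A's inner loop, over any word list
theorem foldl_stepA_inv (cs : List (List Char)) (b : List Char) (u : List (List Char))
    (hn : u.Nodup) :
    (List.foldl stepA (b, u) cs).2.flatten ++ (List.foldl stepA (b, u) cs).1
      = u.flatten ++ b
    ∧ (List.foldl stepA (b, u) cs).2.Nodup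
    ∧ ∀ c ∈ (List.foldl stepA (b, u) cs).2, c ∈ u ∨ c ∈ cs := by
  induction cs generalizing b u with
  | nil => exact ⟨rfl, hn, fun c hc => Or.inl hc⟩
  | cons c cs ih =>
    rw [List.foldl_cons]
    by_cases h : PySem.List.slice b none (some (c.length : Int)) = c ∧ c ∉ u
    · have hst : stepA (b, u) c = (PySem.List.slice b (some (c.length : Int)) none, u ++ [c]) :=
        if_pos h
      rw [hst]
      have hn' : (u ++ [c]).Nodup := by
        rw [List.nodup_append]
        refine ⟨hn, List.nodup_singleton c, ?_⟩
        intro a ha a' ha'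
        rw [List.mem_singleton] at ha'
        subst ha'
        exact fun he => h.2 (he ▸ ha)
      obtain ⟨h1, h2, h3⟩ := ih _ _ hn'
      refine ⟨?_, h2, ?_⟩
      · rw [h1]
        simp only [List.flatten_append, List.flatten_cons, List.flatten_nil,
          List.append_nil, List.append_assoc]
        congr 1
        rw [PySem.List.slice_from_natCast]
        conv_rhs => rw [← List.take_append_drop c.length b]
        have htake := h.1
        rw [PySem.List.slice_to_natCast] at htake
        rw [htake]
      · intro d hd
        rcases h3 d hd with hmem | hmem
        · rcases List.mem_append.1 hmem with hmem | hmem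
          · exact Or.inl hmem
          · simp only [List.mem_singleton] at hmem
            subst hmem; exact Or.inr (List.mem_cons_self ..)
        · exact Or.inr (List.mem_cons_of_mem _ hmem)
    · have hst : stepA (b, u) c = (b, u) := if_neg h
      rw [hst]
      obtain ⟨h1, h2, h3⟩ := ih b u hn
      exact ⟨h1, h2, fun d hd => (h3 d hd).imp id (List.mem_cons_of_mem _)⟩

-- invariant of the whole parse (folded over any round list)
theorem foldl_rounds_inv (rs : List Int) (b : List Char) (u : List (List Char))
    (hn : u.Nodup) :
    (List.foldl (fun st _ => canA.foldl stepA st) (b, u) rs).2.flatten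
        ++ (List.foldl (fun st _ => canA.foldl stepA st) (b, u) rs).1
      = u.flatten ++ b
    ∧ (List.foldl (fun st _ => canA.foldl stepA st) (b, u) rs).2.Nodup
    ∧ ∀ c ∈ (List.foldl (fun st _ => canA.foldl stepA st) (b, u) rs).2,
        c ∈ u ∨ c ∈ canA := by
  induction rs generalizing b u with
  | nil => exact ⟨rfl, hn, fun c hc => Or.inl hc⟩
  | cons r rs ih =>
    rw [List.foldl_cons]
    rcases hbu : canA.foldl stepA (b, u) with ⟨b', u'⟩
    obtain ⟨h1, h2, h3⟩ := foldl_stepA_inv canA b u hn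
    rw [hbu] at h1 h2 h3
    obtain ⟨h1', h2', h3'⟩ := ih b' u' h2
    refine ⟨by rw [h1', h1], h2', ?_⟩
    intro c hc
    rcases h3' c hc with hmem | hmem
    · exact h3 c hmem
    · exact Or.inr hmem

theorem parseA_inv (b : List Char) :
    (parseA b).2.flatten ++ (parseA b).1 = b
    ∧ (parseA b).2.Nodup ∧ ∀ c ∈ (parseA b).2, c ∈ canA := by
  obtain ⟨h1, h2, h3⟩ := foldl_rounds_inv (PySem.List.pyRange 0 4 1) b [] List.nodup_nil
  refine ⟨?_, h2, fun c hc => (h3 c hc).resolve_left (by simp)⟩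
  unfold parseA
  simpa using h1

-- picking a member: picksB contains a pair (w, r) with r keeping everything else
theorem picksB_pick (avail : List (List Char)) (w : List Char) (hw : w ∈ avail) :
    ∃ r, (w, r) ∈ picksB avail ∧ r ⊆ avail ∧ (avail.Nodup → r.Nodup)
      ∧ ∀ x ∈ avail, x ≠ w → x ∈ r := by
  induction avail with
  | nil => cases hw
  | cons x rest ih =>
    rcases List.mem_cons.1 hw with hw | hw
    · subst hw
      refine ⟨rest, List.mem_cons_self .., fun a ha => List.mem_cons_of_mem _ ha,
        fun hn => hn.of_cons, ?_⟩
      intro y hy hne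
      rcases List.mem_cons.1 hy with h | h
      · exact absurd h hne
      · exact h
    · obtain ⟨r', hmem, hsub, hnd, hall⟩ := ih hw
      refine ⟨x :: r', ?_, ?_, ?_, ?_⟩
      · exact List.mem_cons_of_mem _ (List.mem_map.2 ⟨(w, r'), hmem, rfl⟩)
      · intro a ha
        rcases List.mem_cons.1 ha with h | h
        · exact h ▸ List.mem_cons_self ..
        · exact List.mem_cons_of_mem _ (hsub h)
      · intro hn
        rw [List.nodup_cons] at hn ⊢
        exact ⟨fun hx => hn.1 (hsub hx), hnd hn.2⟩
      · intro y hy hne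
        rcases List.mem_cons.1 hy with h | h
        · exact h ▸ List.mem_cons_self ..
        · exact List.mem_cons_of_mem _ (hall y h hne)

-- the accumulated table only grows
theorem stepB_acc_mono (rs : List (List Char))
    (st : List (List Char × List (List Char)) × List (List Char)) :
    st.2 ⊆ (List.foldl (fun st _ => stepB st) st rs).2 := by
  induction rs generalizing st with
  | nil => exact fun a ha => ha
  | cons r rs ih =>
    intro a ha
    rw [List.foldl_cons]
    exact ih _ (List.mem_append_left _ ha)
-- main table lemma: from a live layer entry (s, avail), any short duplicate-free
-- selection u from avail puts s ++ u.flatten into the final table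
theorem stepB_reach (rs : List (List Char)) :
    ∀ (st : List (List Char × List (List Char)) × List (List Char))
      (s : List Char) (avail : List (List Char)) (u : List (List Char)),
      (s, avail) ∈ st.1 → s ∈ st.2 → u.Nodup → u ⊆ avail → avail.Nodup →
      u.length ≤ rs.length →
      s ++ u.flatten ∈ (List.foldl (fun st _ => stepB st) st rs).2 := by
  induction rs with
  | nil =>
    intro st s avail u hlay hacc hnd hsub hand hlen
    have hu : u = [] := List.length_eq_zero_iff.1 (Nat.le_zero.1 (by simpa using hlen))
    subst hu
    simpa using hacc
  | cons r rs ih =>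
    intro st s avail u hlay hacc hnd hsub hand hlen
    rw [List.foldl_cons]
    cases u with
    | nil =>
      have h2 : s ∈ (stepB st).2 := List.mem_append_left _ hacc
      simpa using stepB_acc_mono rs (stepB st) h2
    | cons c u' =>
      have hc : c ∈ avail := hsub (List.mem_cons_self ..)
      obtain ⟨rest, hpick, hrsub, hrnd, hrall⟩ := picksB_pick avail c hc
      rw [List.nodup_cons] at hnd
      have hlay' : (s ++ c, rest) ∈ (stepB st).1 :=
        List.mem_flatMap.2 ⟨(s, avail), hlay, List.mem_map.2 ⟨(c, rest), hpick, rfl⟩⟩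
      have hacc' : s ++ c ∈ (stepB st).2 :=
        List.mem_append_right _ (List.mem_map.2 ⟨(s ++ c, rest), hlay', rfl⟩)
      have hsub' : u' ⊆ rest := by
        intro x hx
        exact hrall x (hsub (List.mem_cons_of_mem _ hx)) (fun he => hnd.1 (he ▸ hx))
      have := ih (stepB st) (s ++ c) rest u' hlay' hacc' hnd.2 hsub' (hrnd hand)
        (by simpa using Nat.le_of_succ_le_succ (by simpa using hlen))
      simpa [List.append_assoc] using this

-- every duplicate-free sequence of words from canA has its concatenation in validB
theorem flatten_mem_validB (u : List (List Char)) (hn : u.Nodup) (hs : ∀ c ∈ u, c ∈ canA) :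
    u.flatten ∈ validB := by
  have hwnd : wordsB.Nodup := by decide
  have hsub : List.Subperm u wordsB := hn.subperm (fun c hc => hs c hc)
  have hlen : u.length ≤ wordsB.length := hsub.length_le
  have := stepB_reach wordsB ([([], wordsB)], [[]]) [] wordsB u
    (List.mem_singleton.2 rfl) (List.mem_singleton.2 rfl) hn
    (fun c hc => hs c hc) hwnd (by simpa using hlen)
  simpa using this

set_option maxHeartbeats 4000000 in
set_option maxRecDepth 16000 in
-- every table entry is emptied by A's parse
theorem validB_parsed : ∀ s ∈ validB, (parseA s).1 = [] := by decide

-- the per-string conditions of A and B coincide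
theorem parse_iff_mem (b : List Char) : (parseA b).1 = [] ↔ validB.contains b = true := by
  constructor
  · intro h
    obtain ⟨h1, h2, h3⟩ := parseA_inv b
    rw [h, List.append_nil] at h1
    exact List.contains_iff_mem.2 (h1 ▸ flatten_mem_validB _ h2 h3)
  · intro h
    exact validB_parsed b (List.contains_iff_mem.1 h)

theorem foldl_count_congr (xs : List String) (a : Int) :
    xs.foldl (fun answer babb =>
      if (parseA babb.toList).1 = [] then answer + 1 else answer) a
    = xs.foldl (fun acc b => if validB.contains b.toList then acc + 1 else acc) a := by
  induction xs generalizing a with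
  | nil => simp only [List.foldl_nil]
  | cons x xs ih =>
    rw [List.foldl_cons, List.foldl_cons, if_congr (parse_iff_mem x.toList) rfl rfl, ih]

-- ===== VERDICT (by name: the statement is the Claim_ definition above) =====
theorem solution_spec : Claim_equal_solution := by
  intro babbling _
  unfold Spec_solution solution solution_alt
  exact foldl_count_congr babbling 0
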